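-- pv_equiv track=rewrite | github.com/FrantaH/ISJ | isj_proj3_xhoraz02.py | first_odd_or_even
-- ===== SOURCE A (Python) =====
-- def first_odd_or_even(numbers):
--     """Returns 0 if there is the same number of even numbers and odd numbers
--        in the input list of ints, or there are only odd or only even numbers.
--        Returns the first odd number in the input list if the list has more even
--        numbers.
--        Returns the first even number in the input list if the list has more odd
--        numbers.
--
--     >>> first_odd_or_even([2,4,2,3,6])
--     3
--     >>> first_odd_or_even([3,5,4])
--     4
--     >>> first_odd_or_even([2,4,3,5])
--     0
--     >>> first_odd_or_even([2,4])
--     0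
--     >>> first_odd_or_even([3])
--     0
--     >>> first_odd_or_even([1,1,1,1,6,3])
--     6
--     >>> first_odd_or_even([2])
--     0
--     >>> first_odd_or_even([333,14,29,15])
--     14
--     """
--
--     count_odd = 0
--     count_even = 0
--     for x in numbers:
--         if x % 2:
--             if count_odd == 0:
--                 first_odd = x
--             count_odd+=1
--         else:
--             if count_even == 0:
--                 first_even = x
--             count_even+=1
--     if count_odd == 0 or count_even == 0 or count_even == count_odd:
--         return 0
--     elif count_even < count_odd:
--         return first_even
--     else:
--         return first_odd
-- ===== SOURCE B (Python) =====
-- def first_odd_or_even(numbers):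
--     n = len(numbers)
--     k = sum(x % 2 for x in numbers)  # number of odd elements
--     if k == 0 or k == n or 2 * k == n:
--         return 0
--     want = 0 if 2 * k > n else 1  # minority parity
--     return next(x for x in numbers if x % 2 == want)
-- ===== Notes on version B (the rewrite author's own statement) =====
-- stated objective: alternative
-- what changed: Instead of A's single interleaved pass that maintains two counters and captures first-odd/first-even as it goes, B counts odds arithmetically as the sum of x % 2, derives the minority parity from 2*k vs n, and only then does a second linear search for the first element of that parity (no lists built, no first-capture state).
import Mathlib
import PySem

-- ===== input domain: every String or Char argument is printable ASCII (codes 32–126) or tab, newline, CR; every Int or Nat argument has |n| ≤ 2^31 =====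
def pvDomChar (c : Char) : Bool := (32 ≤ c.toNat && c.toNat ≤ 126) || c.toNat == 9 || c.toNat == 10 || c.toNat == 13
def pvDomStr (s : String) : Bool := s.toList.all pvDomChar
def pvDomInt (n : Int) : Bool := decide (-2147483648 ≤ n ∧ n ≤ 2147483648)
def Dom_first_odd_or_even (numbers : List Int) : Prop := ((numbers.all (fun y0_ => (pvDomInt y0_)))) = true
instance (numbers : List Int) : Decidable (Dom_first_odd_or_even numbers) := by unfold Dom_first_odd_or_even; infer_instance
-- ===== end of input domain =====

-- B replaces A's interleaved counting/first-capture loop by: count odds as sum(x % 2), derive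
-- the minority parity arithmetically from 2*k vs n, then a separate search pass (objective: alternative).

-- ===== PORT A =====
-- `x % 2` is ported as Lean's Int `%` (emod): for the positive divisor 2 it agrees with Python's `%` exactly.
-- A's loop, state (count_odd, count_even, first_odd, first_even); the first_* slots start at 0
-- (Python leaves them unassigned, but A only reads them after they have been set).
def fooeLoop (xs : List Int) (co ce fo fe : Int) : Int × Int × Int × Int :=
  match xs with
  | [] => (co, ce, fo, fe)
  | x :: rest =>
    if x % 2 ≠ 0 then
      fooeLoop rest (co + 1) ce (if co = 0 then x else fo) fe
    else
      fooeLoop rest co (ce + 1) fo (if ce = 0 then x else fe)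

def first_odd_or_even (numbers : List Int) : Int :=
  let s := fooeLoop numbers 0 0 0 0
  let co := s.1; let ce := s.2.1; let fo := s.2.2.1; let fe := s.2.2.2
  if co = 0 ∨ ce = 0 ∨ ce = co then 0
  else if ce < co then fe
  else fo

-- ===== PORT B =====
-- port of Source B's `next(x for x in numbers if x % 2 == want)`; the 0 default is never reached
-- on the inputs where B calls it (proved via the headD characterisation below).
def fooeFind (xs : List Int) (want : Int) : Int :=
  match xs with
  | [] => 0
  | x :: rest => if x % 2 = want then x else fooeFind rest want

def first_odd_or_even_alt (numbers : List Int) : Int :=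
  let n : Int := numbers.length
  let k : Int := (numbers.map (fun x => x % 2)).sum
  if k = 0 ∨ k = n ∨ 2 * k = n then 0
  else
    let want : Int := if 2 * k > n then 0 else 1
    fooeFind numbers want

-- ===== PRECONDITION & SPEC =====
def Spec_first_odd_or_even (numbers : List Int) (out : Int) : Prop := out = first_odd_or_even_alt numbers
instance (numbers : List Int) (out : Int) : Decidable (Spec_first_odd_or_even numbers out) := by unfold Spec_first_odd_or_even; infer_instance

-- ===== CLAIM =====
def Claim_equal_first_odd_or_even : Prop := ∀ (numbers : List Int), Dom_first_odd_or_even numbers → Spec_first_odd_or_even numbers (first_odd_or_even numbers)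

-- ===== LEMMAS AND PROOFS =====

-- Loop invariant for A's pass: it adds the parity-partition lengths to the counters and, when a
-- counter starts at 0, stores that partition's first element (if any) in its slot.
theorem fooeLoop_eq (xs : List Int) (co ce fo fe : Int) (hco : 0 ≤ co) (hce : 0 ≤ ce) :
    fooeLoop xs co ce fo fe =
      (co + (xs.filter (fun x => x % 2 ≠ 0)).length,
       ce + (xs.filter (fun x => x % 2 = 0)).length,
       (if co = 0 then (xs.filter (fun x => x % 2 ≠ 0)).headD fo else fo),
       (if ce = 0 then (xs.filter (fun x => x % 2 = 0)).headD fe else fe)) := by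
  induction xs generalizing co ce fo fe with
  | nil => simp [fooeLoop]
  | cons x rest ih =>
    by_cases h : x % 2 = 0
    · have hd : (2:Int) ∣ x := by omega
      have hn : ¬ x % 2 = 1 := by omega
      rw [fooeLoop, if_neg (by simp [h]), ih co (ce + 1) fo _ hco (by omega)]
      simp [hd, hn, Prod.ext_iff, show ce + 1 ≠ 0 from by omega]
      omega
    · have hd : ¬ (2:Int) ∣ x := by omega
      have hn : x % 2 = 1 := by omega
      rw [fooeLoop, if_pos h, ih (co + 1) ce _ fe (by omega) hce]
      simp [hd, hn, Prod.ext_iff, show co + 1 ≠ 0 from by omega]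
      omega

-- B's search pass returns the first element of the requested parity (0 if none).
theorem fooeFind_eq (xs : List Int) (w : Int) :
    fooeFind xs w = (xs.filter (fun x => x % 2 = w)).headD 0 := by
  induction xs with
  | nil => simp [fooeFind]
  | cons x rest ih =>
    by_cases h : x % 2 = w <;> simp [fooeFind, h, ih]

-- B's count: the sum of x % 2 is the number of odd elements.
theorem sum_mod_two (xs : List Int) :
    (xs.map (fun x => x % 2)).sum = ((xs.filter (fun x => x % 2 ≠ 0)).length : Int) := by
  induction xs with
  | nil => simp
  | cons x rest ih =>
    simp only [List.map_cons, List.sum_cons, ih, List.filter_cons]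
    by_cases h : x % 2 = 0
    · simp [h]
    · have h1 : x % 2 = 1 := by omega
      simp [h1]
      omega

theorem filter_one_eq (xs : List Int) :
    xs.filter (fun x => x % 2 = 1) = xs.filter (fun x => x % 2 ≠ 0) := by
  refine List.filter_congr ?_
  intro x _
  have : x % 2 = 0 ∨ x % 2 = 1 := by omega
  rcases this with h | h <;> simp [h]

-- The two parity partitions cover the list.
theorem filter_len_add (xs : List Int) :
    (xs.filter (fun x => x % 2 ≠ 0)).length
      + (xs.filter (fun x => x % 2 = 0)).length = xs.length := by
  induction xs with
  | nil => rfl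
  | cons x rest ih =>
    simp only [List.filter_cons, List.length_cons]
    by_cases h : x % 2 = 0
    · rw [if_neg (by simpa using h), if_pos (by simpa using h), List.length_cons]
      omega
    · rw [if_pos (by simpa using h), if_neg (by simpa using h), List.length_cons]
      omega

-- ===== VERDICT =====
theorem first_odd_or_even_spec : Claim_equal_first_odd_or_even := by
  intro numbers _
  unfold Spec_first_odd_or_even first_odd_or_even first_odd_or_even_alt
  rw [fooeLoop_eq _ _ _ _ _ le_rfl le_rfl]
  have hlen := filter_len_add numbers
  simp only [sum_mod_two, fooeFind_eq, zero_add, reduceIte]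
  split_ifs
  all_goals try rfl
  all_goals try rw [filter_one_eq]
  all_goals omega
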